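-- pv_equiv track=rewrite | github.com/StevenXoFk/Tarea-taller-Tkinter | convertidor.py | base8_a_base15
-- ===== SOURCE A (Python) =====
-- def base8_a_base15(numero):
--     res = 0
--     exponentee = 0
--     base15 = ""
--
--
--     diles = "0123456789ABCDEF"
--
--     while numero > 0:
--         nuevo = numero % 10
--         res += nuevo * (8 ** exponentee)
--         numero //= 10
--         exponentee += 1
--
--     while res > 0:
--         todo = res % 15
--         base15 = diles[todo] + base15
--         res //= 15
--
--     return base15
-- ===== SOURCE B (Python) =====
-- def base8_a_base15(numero):
--     diles = "0123456789ABCDEF"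
--
--     # stage 1: collect the decimal digits (LSB first) into a list
--     digits = []
--     while numero > 0:
--         digits.append(numero % 10)
--         numero //= 10
--
--     # stage 2: Horner fold over the digits MSB-first (no exponent state)
--     res = 0
--     for d in reversed(digits):
--         res = res * 8 + d
--
--     # stage 3: collect base-15 digit characters LSB first, then join reversed
--     out = []
--     while res > 0:
--         out.append(diles[res % 15])
--         res //= 15
--     return "".join(reversed(out))
-- ===== Notes on version B (the rewrite author's own statement) =====
-- stated objective: alternative
-- what changed: Replaces A's single-pass LSB-first decode with an explicit power-of-eight exponent accumulator and string-prepending encode by a staged list-based pipeline: collect decimal digits into a list, Horner-fold over the reversed list (no exponent), collect base-fifteen characters into a list and join them reversed.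
import Mathlib
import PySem

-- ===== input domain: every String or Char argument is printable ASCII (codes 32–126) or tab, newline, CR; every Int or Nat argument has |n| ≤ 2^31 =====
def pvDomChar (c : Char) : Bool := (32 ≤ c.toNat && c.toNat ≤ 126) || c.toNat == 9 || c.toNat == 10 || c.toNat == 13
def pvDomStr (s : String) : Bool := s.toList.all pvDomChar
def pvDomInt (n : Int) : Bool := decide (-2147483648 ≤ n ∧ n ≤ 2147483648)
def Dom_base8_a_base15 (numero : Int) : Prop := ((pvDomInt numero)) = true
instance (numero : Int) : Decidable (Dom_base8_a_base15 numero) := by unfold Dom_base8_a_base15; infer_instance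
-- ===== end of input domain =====

-- B replaces A's exponent-accumulator decode and string-prepending encode by a staged list pipeline
-- (digit list, Horner fold over its reverse, character list joined reversed); same cost, different structure.

-- ===== PORT A =====
-- first while loop: decode the decimal digits of numero as base-8, LSB first with an explicit exponent
def pvDecodeA (numero res : Int) (exponentee : Nat) : Int :=
  if numero > 0 then
    pvDecodeA (PySem.Int.floordiv numero 10)
      (res + (PySem.Int.mod numero 10) * 8 ^ exponentee) (exponentee + 1)
  else res
termination_by numero.toNat
decreasing_by
  rw [PySem.Int.floordiv_eq_ediv_of_pos (by norm_num)]; omega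

-- second while loop: encode res in base 15, prepending each digit
-- (diles[todo] ported via Str.pyGet?; the index 0 ≤ todo < 15 is always in range, the none-branch never reached)
def pvEncodeA (res : Int) (base15 : String) : String :=
  if res > 0 then
    pvEncodeA (PySem.Int.floordiv res 15)
      ((match PySem.Str.pyGet? "0123456789ABCDEF" (PySem.Int.mod res 15) with
        | some c => String.singleton c
        | none => "") ++ base15)
  else base15
termination_by res.toNat
decreasing_by
  rw [PySem.Int.floordiv_eq_ediv_of_pos (by norm_num)]; omega

def base8_a_base15 (numero : Int) : String := pvEncodeA (pvDecodeA numero 0 0) ""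

-- ===== PORT B =====
-- stage 1: the list of decimal digits, LSB first (python: while-loop appending numero % 10)
def pvDigitsB (n : Int) : List Int :=
  if n > 0 then PySem.Int.mod n 10 :: pvDigitsB (PySem.Int.floordiv n 10) else []
termination_by n.toNat
decreasing_by
  rw [PySem.Int.floordiv_eq_ediv_of_pos (by norm_num)]; omega

-- stage 3: the list of base-15 digit strings, LSB first (python: out.append(diles[res % 15]))
-- (diles[res % 15] ported via Str.pyGet?; always in range, the none-branch never reached)
def pvRemsB (r : Int) : List String :=
  if r > 0 then
    (match PySem.Str.pyGet? "0123456789ABCDEF" (PySem.Int.mod r 15) with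
      | some c => String.singleton c
      | none => "") :: pvRemsB (PySem.Int.floordiv r 15)
  else []
termination_by r.toNat
decreasing_by
  rw [PySem.Int.floordiv_eq_ediv_of_pos (by norm_num)]; omega

def base8_a_base15_alt (numero : Int) : String :=
  -- stage 2: Horner fold over the reversed digit list; then join the reversed character list
  String.join ((pvRemsB ((pvDigitsB numero).reverse.foldl (fun r d => r * 8 + d) 0)).reverse)

-- ===== PRECONDITION & SPEC =====
def Spec_base8_a_base15 (numero : Int) (out : String) : Prop := out = base8_a_base15_alt numero
instance (numero : Int) (out : String) : Decidable (Spec_base8_a_base15 numero out) := by unfold Spec_base8_a_base15; infer_instance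

-- ===== CLAIM (what is proved, stated in full; the proofs are below) =====
def Claim_equal_base8_a_base15 : Prop := ∀ (numero : Int), Dom_base8_a_base15 numero → Spec_base8_a_base15 numero (base8_a_base15 numero)

-- ===== LEMMAS AND PROOFS =====
-- the Horner fold over the reversed digit list, as a function of n
theorem horner_digits (n : Int) :
    (pvDigitsB n).reverse.foldl (fun r d => r * 8 + d) 0 =
      if n > 0 then
        (pvDigitsB (PySem.Int.floordiv n 10)).reverse.foldl (fun r d => r * 8 + d) 0 * 8
          + PySem.Int.mod n 10
      else 0 := by
  rw [pvDigitsB]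
  by_cases h : n > 0
  · simp [h, List.foldl_append]
  · simp [h]

theorem pvDecodeA_eq (numero res : Int) (exponentee : Nat) :
    pvDecodeA numero res exponentee =
      res + (pvDigitsB numero).reverse.foldl (fun r d => r * 8 + d) 0 * 8 ^ exponentee := by
  rw [pvDecodeA, horner_digits]
  by_cases h : numero > 0
  · rw [if_pos h, if_pos h, pvDecodeA_eq]
    ring
  · rw [if_neg h, if_neg h]
    ring
termination_by numero.toNat
decreasing_by
  rw [PySem.Int.floordiv_eq_ediv_of_pos (by norm_num)]; omega

theorem pvEncodeA_eq (res : Int) (base15 : String) :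
    pvEncodeA res base15 = String.join (pvRemsB res).reverse ++ base15 := by
  rw [pvEncodeA, pvRemsB]
  by_cases h : res > 0
  · rw [if_pos h, if_pos h, pvEncodeA_eq]
    simp [String.join, List.foldl_append, String.append_assoc]
  · rw [if_neg h, if_neg h]
    simp [String.join]
termination_by res.toNat
decreasing_by
  rw [PySem.Int.floordiv_eq_ediv_of_pos (by norm_num)]; omega

-- ===== VERDICT (by name: the statement is the Claim_ definition above) =====
theorem base8_a_base15_spec : Claim_equal_base8_a_base15 := by
  intro numero _
  show base8_a_base15 numero = base8_a_base15_alt numero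
  rw [base8_a_base15, base8_a_base15_alt, pvEncodeA_eq, pvDecodeA_eq]
  simp
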